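-- pv_equiv track=rewrite | github.com/kevin-toles/tpm-job-finder-poc | tpm_job_finder_poc/enrichment/salary_benchmarking_service.py | _categorize_role
-- ===== SOURCE A (Python) =====
-- def _categorize_role(title: str) -> str:
--     """Categorize a job title for salary analysis."""
--     title_lower = title.lower()
--
--     if any(keyword in title_lower for keyword in ['technical program manager', 'tpm', 'program manager']):
--         return 'technical_program_manager'
--     elif any(keyword in title_lower for keyword in ['product manager', 'product lead', 'product owner']):
--         return 'product_manager'
--     elif any(keyword in title_lower for keyword in ['engineering manager', 'engineering lead', 'tech lead']):
--         return 'engineering_manager'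
--     elif any(keyword in title_lower for keyword in ['data scientist', 'machine learning', 'data engineer']):
--         return 'data_science'
--     elif any(keyword in title_lower for keyword in ['consultant', 'strategy']):
--         return 'consultant'
--     else:
--         return 'other'
-- ===== SOURCE B (Python) =====
-- # Flat keyword->category pairs (no grouping into branches).
-- _KEYWORD_CATEGORY = [
--     ('technical program manager', 'technical_program_manager'),
--     ('tpm', 'technical_program_manager'),
--     ('program manager', 'technical_program_manager'),
--     ('product manager', 'product_manager'),
--     ('product lead', 'product_manager'),
--     ('product owner', 'product_manager'),
--     ('engineering manager', 'engineering_manager'),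
--     ('engineering lead', 'engineering_manager'),
--     ('tech lead', 'engineering_manager'),
--     ('data scientist', 'data_science'),
--     ('machine learning', 'data_science'),
--     ('data engineer', 'data_science'),
--     ('consultant', 'consultant'),
--     ('strategy', 'consultant'),
-- ]
--
-- _PRIORITY = ['technical_program_manager', 'product_manager',
--              'engineering_manager', 'data_science', 'consultant']
--
--
-- def _categorize_role(title: str) -> str:
--     """Categorize a job title: collect every matched category, then pick the
--     highest-priority one (two staged passes instead of an if/elif chain)."""
--     title_lower = title.lower()
--     matched = [cat for kw, cat in _KEYWORD_CATEGORY if kw in title_lower]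
--     for cat in _PRIORITY:
--         if cat in matched:
--             return cat
--     return 'other'
-- ===== Notes on version B (the rewrite author's own statement) =====
-- stated objective: alternative
-- what changed: Instead of an if/elif chain with per-branch early exit, B scans a flat keyword-to-category pair list once to collect ALL matched categories, then a second pass over a priority list returns the first matched category.
import Mathlib
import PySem

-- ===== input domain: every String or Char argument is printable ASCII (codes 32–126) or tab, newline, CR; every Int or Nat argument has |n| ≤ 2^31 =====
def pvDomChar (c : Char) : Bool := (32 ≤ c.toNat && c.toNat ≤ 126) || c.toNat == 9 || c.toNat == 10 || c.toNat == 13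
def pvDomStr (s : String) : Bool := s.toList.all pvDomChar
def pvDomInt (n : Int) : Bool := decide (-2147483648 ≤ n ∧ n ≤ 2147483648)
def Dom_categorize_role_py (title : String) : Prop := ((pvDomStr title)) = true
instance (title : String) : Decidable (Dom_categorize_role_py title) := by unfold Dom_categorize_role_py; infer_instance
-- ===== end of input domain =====

-- B replaces A's early-exit if/elif chain by two staged passes: collect every matched category from a flat keyword->category pair list, then pick the first matched one in priority order (objective: alternative).


-- ===== PORT A =====
def categorize_role_py (title : String) : String :=
  let title_lower := PySem.Str.lower title
  if ["technical program manager", "tpm", "program manager"].any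
      (fun keyword => PySem.Str.isIn keyword title_lower) then
    "technical_program_manager"
  else if ["product manager", "product lead", "product owner"].any
      (fun keyword => PySem.Str.isIn keyword title_lower) then
    "product_manager"
  else if ["engineering manager", "engineering lead", "tech lead"].any
      (fun keyword => PySem.Str.isIn keyword title_lower) then
    "engineering_manager"
  else if ["data scientist", "machine learning", "data engineer"].any
      (fun keyword => PySem.Str.isIn keyword title_lower) then
    "data_science"
  else if ["consultant", "strategy"].any
      (fun keyword => PySem.Str.isIn keyword title_lower) then
    "consultant"
  else
    "other"

-- ===== PORT B =====
def keywordCategory : List (String × String) :=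
  [ ("technical program manager", "technical_program_manager"),
    ("tpm", "technical_program_manager"),
    ("program manager", "technical_program_manager"),
    ("product manager", "product_manager"),
    ("product lead", "product_manager"),
    ("product owner", "product_manager"),
    ("engineering manager", "engineering_manager"),
    ("engineering lead", "engineering_manager"),
    ("tech lead", "engineering_manager"),
    ("data scientist", "data_science"),
    ("machine learning", "data_science"),
    ("data engineer", "data_science"),
    ("consultant", "consultant"),
    ("strategy", "consultant") ]

def rolePriority : List String :=
  ["technical_program_manager", "product_manager", "engineering_manager",
   "data_science", "consultant"]

-- the 'for cat in _PRIORITY: if cat in matched: return cat' loop with fall-through 'other'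
def firstMatched (matched : List String) : List String → String
  | [] => "other"
  | cat :: rest => if matched.contains cat then cat else firstMatched matched rest

def categorize_role_py_alt (title : String) : String :=
  let title_lower := PySem.Str.lower title
  let matched :=
    (keywordCategory.filter (fun p => PySem.Str.isIn p.1 title_lower)).map Prod.snd
  firstMatched matched rolePriority

-- ===== PRECONDITION & SPEC =====
def Spec_categorize_role_py (title : String) (out : String) : Prop := out = categorize_role_py_alt title
instance (title : String) (out : String) : Decidable (Spec_categorize_role_py title out) := by unfold Spec_categorize_role_py; infer_instance

-- ===== CLAIM (what is proved, stated in full; the proofs are below) =====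
def Claim_equal_categorize_role_py : Prop := ∀ (title : String), Dom_categorize_role_py title → Spec_categorize_role_py title (categorize_role_py title)

-- ===== LEMMAS AND PROOFS =====

-- ===== VERDICT (by name: the statement is the Claim_ definition above) =====
theorem categorize_role_py_spec : Claim_equal_categorize_role_py := by
  intro title _
  unfold Spec_categorize_role_py categorize_role_py categorize_role_py_alt
  simp only [firstMatched, rolePriority, keywordCategory, List.any_cons, List.any_nil]
  split_ifs <;> simp_all
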